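-- pv_equiv track=rewrite | github.com/daniel-reich/turbo-robot | 3cyb3mdBKw67LpGP7_14.py | numbers_need_friends_too
-- ===== SOURCE A (Python) =====
-- def numbers_need_friends_too(m):
--   qq=str(m)
--   n=[int(i) for i in qq]
--   index=[]
--   for i in range(0,len(n)-1):
--     if n[i] != n[i+1]:
--       index.append(i)
--   index= [x+1 for x in index]
--   final_lst=[]
--   for i,j in zip([0]+index,index+[None]):
--     if len(n[i:j])<2:
--       temp_lst=n[i:j]+n[i:j]+n[i:j]
--     else:
--       temp_lst=n[i:j]
--     final_lst.extend(temp_lst)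
--   qqq=[str(i) for i in final_lst]
--   a_a="".join(qqq)
--   return int(a_a)
-- ===== SOURCE B (Python) =====
-- def numbers_need_friends_too(m):
--     s = str(m)
--     prevs = [None] + list(s)
--     nexts = list(s[1:]) + [None]
--     out = [c * 3 if p != c and nx != c else c for p, c, nx in zip(prevs, s, nexts)]
--     return int("".join(out))
-- ===== Notes on version B (the rewrite author's own statement) =====
-- stated objective: alternative
-- what changed: B never computes runs or their boundaries at all: it zips the digit string with a left-shifted and a right-shifted copy of itself and applies a purely local per-character rule (triple a digit iff it differs from both neighbors), whereas A builds a list of run-boundary indices, shifts them, and zip-slices the digit list into run segments.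
import Mathlib
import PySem

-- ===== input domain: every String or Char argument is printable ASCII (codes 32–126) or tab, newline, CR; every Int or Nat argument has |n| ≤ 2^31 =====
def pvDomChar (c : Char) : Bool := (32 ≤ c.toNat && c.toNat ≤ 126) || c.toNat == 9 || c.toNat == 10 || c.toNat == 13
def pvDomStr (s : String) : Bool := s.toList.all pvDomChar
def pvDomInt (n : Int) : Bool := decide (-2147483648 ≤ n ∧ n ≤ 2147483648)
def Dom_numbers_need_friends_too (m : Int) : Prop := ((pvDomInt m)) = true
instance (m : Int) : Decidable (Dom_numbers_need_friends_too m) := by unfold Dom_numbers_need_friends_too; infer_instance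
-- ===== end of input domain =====

-- B replaces A's run-boundary-index/zip-slice pipeline by a purely local per-character rule over
-- the string zipped with its two shifted copies (objective: alternative; not claimed faster).

-- int(c) for a single character c (exact: none = ValueError; those inputs are excluded by Pre_)
def pvDigit (c : Char) : Int := (PySem.Int.ofChars? [c]).getD 0

-- ===== PORT A =====
def numbers_need_friends_too (m : Int) : Int :=
  let qq : List Char := PySem.Int.toChars m
  let n : List Int := qq.map (fun i => pvDigit i)
  let index : List Int :=
    (PySem.List.pyRange 0 ((n.length : Int) - 1) 1).foldl
      (fun acc i =>
        if PySem.List.pyGetD n i 0 ≠ PySem.List.pyGetD n (i + 1) 0 then acc ++ [i] else acc) []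
  let index := index.map (fun x => x + 1)
  let final_lst : List Int :=
    (([(0 : Int)] ++ index).zip (index.map some ++ [none])).foldl
      (fun acc ij =>
        let seg := PySem.List.slice n (some ij.1) ij.2
        let temp_lst := if seg.length < 2 then seg ++ seg ++ seg else seg
        acc ++ temp_lst) []
  let qqq : List (List Char) := final_lst.map (fun i => PySem.Int.toChars i)
  let a_a : List Char := PySem.Chars.join [] qqq
  (PySem.Int.ofChars? a_a).getD 0

-- ===== PORT B =====
-- prevs = [None]+list(s); nexts = list(s[1:])+[None]; one zip3, one local rule per character
def numbers_need_friends_too_alt (m : Int) : Int :=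
  let s : List Char := PySem.Int.toChars m
  let prevs : List (Option Char) := [none] ++ s.map some
  let nexts : List (Option Char) := (s.drop 1).map some ++ [none]
  let out : List (List Char) :=
    (prevs.zip (s.zip nexts)).map (fun pcn =>
      if pcn.1 ≠ some pcn.2.1 ∧ pcn.2.2 ≠ some pcn.2.1
      then [pcn.2.1, pcn.2.1, pcn.2.1] else [pcn.2.1])
  (PySem.Int.ofChars? (PySem.Chars.join [] out)).getD 0

-- ===== PRECONDITION & SPEC =====
-- Pre_ excludes negative inputs, on which A raises ValueError (int() applied to the sign character); B raises there too.
def Pre_numbers_need_friends_too (m : Int) : Prop := 0 ≤ m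
instance (m : Int) : Decidable (Pre_numbers_need_friends_too m) := by unfold Pre_numbers_need_friends_too; infer_instance
def pvWitness_numbers_need_friends_too : Int := 1223

def Spec_numbers_need_friends_too (m : Int) (out : Int) : Prop := out = numbers_need_friends_too_alt m
instance (m : Int) (out : Int) : Decidable (Spec_numbers_need_friends_too m out) := by unfold Spec_numbers_need_friends_too; infer_instance

-- ===== CLAIM (what is proved, stated in full; the proofs are below) =====
def Claim_equal_numbers_need_friends_too : Prop := ∀ (m : Int), Dom_numbers_need_friends_too m → Pre_numbers_need_friends_too m → Spec_numbers_need_friends_too m (numbers_need_friends_too m)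

-- ===== LEMMAS AND PROOFS =====

-- maximal runs of equal characters (the segments A's cut positions carve out of the string)
def pyRuns : List Char → List (List Char)
  | [] => []
  | c :: cs => (c :: cs.takeWhile (fun x => x == c)) :: pyRuns (cs.dropWhile (fun x => x == c))
termination_by l => l.length
decreasing_by
  simp only [List.length_cons]
  exact Nat.lt_succ_of_le (List.length_dropWhile_le _ _)

-- runs of equal elements, Int version
def runsI : List Int → List (List Int)
  | [] => []
  | c :: cs => (c :: cs.takeWhile (fun x => x == c)) :: runsI (cs.dropWhile (fun x => x == c))
termination_by l => l.length
decreasing_by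
  simp only [List.length_cons]
  exact Nat.lt_succ_of_le (List.length_dropWhile_le _ _)

-- triple a singleton segment
def hTriple (g : List Int) : List Int := if g.length == 1 then g ++ g ++ g else g
def hTripleC (g : List Char) : List Char := if g.length == 1 then g ++ g ++ g else g

-- B's per-character rule, recursively, carrying the previous character
def pcE : Option Char → List Char → List (List Char)
  | _, [] => []
  | prev, c :: cs =>
      (if prev ≠ some c ∧ cs.head? ≠ some c then [c, c, c] else [c]) :: pcE (some c) cs

-- A's zip-slice fold, rephrased over Nat cut positions
def natChop (n : List Int) (s : Nat) : List Nat → List Int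
  | [] => hTriple (n.drop s)
  | j :: js => hTriple ((n.drop s).take (j - s)) ++ natChop n j js

-- A's boundary positions, recursively
def cutsRec : List Int → List Nat
  | [] => []
  | [_] => []
  | a :: b :: t => if a ≠ b then 0 :: (cutsRec (b :: t)).map (· + 1) else (cutsRec (b :: t)).map (· + 1)

lemma hA_eq (seg : List Int) :
    (if seg.length < 2 then seg ++ seg ++ seg else seg) = hTriple seg := by
  rcases seg with _ | ⟨a, _ | ⟨b, t⟩⟩ <;> simp [hTriple]

lemma filter_cuts : ∀ (k : Nat) (n : List Int), n.length = k + 1 →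
    (List.range k).filter (fun i => decide (n.getD i 0 ≠ n.getD (i + 1) 0)) = cutsRec n := by
  intro k
  induction k with
  | zero =>
    intro n hn
    rcases n with _ | ⟨a, _ | ⟨b, t⟩⟩ <;> simp_all [cutsRec]
  | succ k ih =>
    intro n hn
    rcases n with _ | ⟨a, n'⟩
    · simp at hn
    rcases n' with _ | ⟨b, t⟩
    · simp at hn
    have hn' : (b :: t).length = k + 1 := by simpa using hn
    rw [List.range_succ_eq_map, List.filter_cons, List.filter_map]
    have hcomp : ((fun i => decide ((a :: b :: t).getD i 0 ≠ (a :: b :: t).getD (i + 1) 0)) ∘ Nat.succ)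
        = (fun i => decide ((b :: t).getD i 0 ≠ (b :: t).getD (i + 1) 0)) := by
      funext i
      simp [Function.comp]
    rw [hcomp, ih _ hn']
    by_cases hab : a = b
    · subst hab
      simp [cutsRec]
    · simp [cutsRec, hab]

lemma fold_pairs (n : List Int) : ∀ (cuts : List Nat) (s : Nat) (acc : List Int),
    ((((s : Nat) : Int) :: cuts.map (fun (i : Nat) => (i : Int))).zip
        ((cuts.map (fun (i : Nat) => (i : Int))).map some ++ [none])).foldl
      (fun acc ij =>
        let seg := PySem.List.slice n (some ij.1) ij.2
        let temp_lst := if seg.length < 2 then seg ++ seg ++ seg else seg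
        acc ++ temp_lst) acc
    = acc ++ natChop n s cuts := by
  intro cuts
  induction cuts with
  | nil =>
    intro s acc
    simp only [List.map_nil, List.nil_append, List.zip_cons_cons,
      List.zip_nil_right, List.foldl_cons, List.foldl_nil]
    rw [PySem.List.slice_from_natCast, hA_eq]
    rfl
  | cons j js ih =>
    intro s acc
    simp only [List.map_cons, List.cons_append, List.zip_cons_cons, List.foldl_cons]
    rw [ih j]
    rw [PySem.List.slice_natCast, hA_eq]
    simp only [natChop, List.append_assoc]

lemma run_split {α : Type} [BEq α] [LawfulBEq α] {c : α} {t rest : List α}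
    (hall : ∀ x ∈ t, x = c) (hshape : rest = [] ∨ ∃ d r', rest = d :: r' ∧ d ≠ c) :
    (t ++ rest).takeWhile (fun x => x == c) = t ∧ (t ++ rest).dropWhile (fun x => x == c) = rest := by
  induction t with
  | nil =>
    rcases hshape with rfl | ⟨d, r', rfl, hd⟩
    · simp
    · simp [hd]
  | cons x t' ih =>
    have hx : x = c := hall x (by simp)
    subst hx
    have := ih (fun y hy => hall y (by simp [hy]))
    simp [this.1, this.2]

lemma cutsRec_run : ∀ (t : List Int) (c : Int) (rest : List Int),
    (∀ x ∈ t, x = c) → (rest = [] ∨ ∃ d r', rest = d :: r' ∧ d ≠ c) →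
    cutsRec (c :: (t ++ rest)) =
      if rest.isEmpty then [] else t.length :: (cutsRec rest).map (· + (t.length + 1)) := by
  intro t
  induction t with
  | nil =>
    intro c rest _ hrest
    rcases hrest with rfl | ⟨d, r', rfl, hd⟩
    · simp [cutsRec]
    · have hne : c ≠ d := fun h => hd h.symm
      simp [cutsRec, hne]
  | cons x t' ih =>
    intro c rest hall hrest
    have hx : x = c := hall x (by simp)
    subst hx
    have hall' : ∀ y ∈ t', y = x := fun y hy => hall y (by simp [hy])
    have hstep : cutsRec (x :: x :: (t' ++ rest)) = (cutsRec (x :: (t' ++ rest))).map (· + 1) := by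
      simp [cutsRec]
    rw [List.cons_append, hstep, ih x rest hall' hrest]
    rcases hrest with rfl | ⟨d, r', rfl, hd⟩
    · simp
    · simp only [List.isEmpty_cons, Bool.false_eq_true, if_false, List.map_cons, List.map_map,
        List.length_cons]
      congr 1

lemma dropWhile_head_false {α : Type} (p : α → Bool) :
    ∀ (l : List α) {d : α} {r : List α}, l.dropWhile p = d :: r → p d = false := by
  intro l
  induction l with
  | nil => intro d r h; simp at h
  | cons a t ih =>
    intro d r h
    by_cases hp : p a
    · rw [List.dropWhile_cons_of_pos hp] at h
      exact ih h
    · rw [List.dropWhile_cons_of_neg hp] at h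
      cases h
      simpa using hp

lemma natChop_shift (r rest : List Int) : ∀ (cuts : List Nat) (s : Nat),
    natChop (r ++ rest) (r.length + s) (cuts.map (· + r.length)) = natChop rest s cuts := by
  have hdrop : ∀ (a : Nat), (r ++ rest).drop (r.length + a) = rest.drop a := by
    intro a
    rw [List.drop_append]
    have h1 : r.drop (r.length + a) = [] := List.drop_eq_nil_of_le (by omega)
    have h2 : r.length + a - r.length = a := by omega
    simp [h1, h2]
  intro cuts
  induction cuts with
  | nil => intro s; simp [natChop, hdrop]
  | cons j js ih =>
    intro s
    simp only [List.map_cons, natChop]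
    rw [hdrop]
    have harith : j + r.length - (r.length + s) = j - s := by omega
    rw [harith]
    have h3 : natChop (r ++ rest) (j + r.length) (js.map (· + r.length)) = natChop rest j js := by
      have := ih j
      rwa [Nat.add_comm r.length j] at this
    rw [h3]

lemma runsI_cons (c : Int) (cs : List Int) :
    runsI (c :: cs) = (c :: cs.takeWhile (fun x => x == c)) :: runsI (cs.dropWhile (fun x => x == c)) := by
  rw [runsI]

lemma pyRuns_cons (c : Char) (cs : List Char) :
    pyRuns (c :: cs) = (c :: cs.takeWhile (fun x => x == c)) :: pyRuns (cs.dropWhile (fun x => x == c)) := by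
  rw [pyRuns]

lemma main_chop : ∀ (n : List Int), natChop n 0 ((cutsRec n).map (· + 1)) = (runsI n).flatMap hTriple := by
  intro n
  induction hk : n.length using Nat.strong_induction_on generalizing n with
  | _ k ih =>
  rcases n with _ | ⟨c, cs⟩
  · simp [cutsRec, natChop, runsI, hTriple]
  · obtain ⟨t, rest, rfl, hall, hshape⟩ :
        ∃ t rest, cs = t ++ rest ∧ (∀ x ∈ t, x = c) ∧
          (rest = [] ∨ ∃ d r', rest = d :: r' ∧ d ≠ c) := by
      refine ⟨cs.takeWhile (fun x => x == c), cs.dropWhile (fun x => x == c),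
        List.takeWhile_append_dropWhile.symm, ?_, ?_⟩
      · intro x hx; simpa using List.mem_takeWhile_imp hx
      · rcases hr : cs.dropWhile (fun x => x == c) with _ | ⟨d, r'⟩
        · exact Or.inl rfl
        · right
          refine ⟨d, r', rfl, ?_⟩
          have := dropWhile_head_false (fun x => x == c) cs hr
          simpa using this
    obtain ⟨htw, hdw⟩ := run_split hall hshape
    rw [cutsRec_run t c rest hall hshape]
    rw [runsI_cons, htw, hdw]
    rcases hshape with rfl | ⟨d, r', hdr, hd⟩
    · simp only [List.isEmpty_nil, if_true, List.map_nil, List.append_nil]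
      simp [natChop, runsI, hTriple]
    · have hne : rest.isEmpty = false := by rw [hdr]; simp
      rw [hne]
      simp only [Bool.false_eq_true, if_false, List.map_cons, List.map_map]
      have hmap : (cutsRec rest).map ((· + 1) ∘ (· + (t.length + 1)))
          = ((cutsRec rest).map (· + 1)).map (· + (c :: t).length) := by
        rw [List.map_map]
        congr 1
        funext i
        simp only [Function.comp, List.length_cons]
        omega
      rw [hmap]
      have hchop : natChop (c :: (t ++ rest)) 0 ((t.length + 1) :: ((cutsRec rest).map (· + 1)).map (· + (c :: t).length))
          = hTriple (c :: t) ++ natChop rest 0 ((cutsRec rest).map (· + 1)) := by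
        simp only [natChop, List.drop_zero, Nat.sub_zero]
        congr 1
        · congr 1
          have h5 : c :: (t ++ rest) = (c :: t) ++ rest := rfl
          rw [h5, List.take_left' (by simp)]
        · have hsh := natChop_shift (c :: t) rest ((cutsRec rest).map (· + 1)) 0
          simp only [Nat.add_zero] at hsh
          have hlen : (c :: t).length = t.length + 1 := by simp
          rw [← hlen]
          exact hsh
      rw [hchop]
      have hlt : rest.length < k := by
        have h6 : (c :: (t ++ rest)).length = k := hk
        simp at h6
        omega
      rw [ih rest.length hlt rest rfl]
      simp [List.flatMap_cons]

lemma takeWhile_congr' {α : Type} (p q : α → Bool) :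
    ∀ (l : List α), (∀ x ∈ l, p x = q x) → l.takeWhile p = l.takeWhile q := by
  intro l
  induction l with
  | nil => intro _; rfl
  | cons a t ih =>
    intro h
    have ha := h a (by simp)
    rw [List.takeWhile_cons, List.takeWhile_cons, ha, ih (fun x hx => h x (by simp [hx]))]

lemma dropWhile_congr' {α : Type} (p q : α → Bool) :
    ∀ (l : List α), (∀ x ∈ l, p x = q x) → l.dropWhile p = l.dropWhile q := by
  intro l
  induction l with
  | nil => intro _; rfl
  | cons a t ih =>
    intro h
    have ha := h a (by simp)
    rw [List.dropWhile_cons, List.dropWhile_cons, ha, ih (fun x hx => h x (by simp [hx]))]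

lemma runs_map : ∀ (k : Nat) (s : List Char), s.length = k →
    (∀ a ∈ s, ∀ b ∈ s, pvDigit a = pvDigit b → a = b) →
    runsI (s.map pvDigit) = (pyRuns s).map (List.map pvDigit) := by
  intro k
  induction k using Nat.strong_induction_on with
  | _ k ih =>
  intro s hk hinj
  rcases s with _ | ⟨c, cs⟩
  · simp [runsI, pyRuns]
  · rw [List.map_cons, runsI_cons, pyRuns_cons]
    have hmemc : c ∈ c :: cs := by simp
    have hcong : ∀ x ∈ cs, ((fun y => y == pvDigit c) ∘ pvDigit) x = (fun y => y == c) x := by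
      intro x hx
      have hxmem : x ∈ c :: cs := by simp [hx]
      simp only [Function.comp]
      by_cases hxc : x = c
      · subst hxc; simp
      · have h2 : pvDigit x ≠ pvDigit c := fun h => hxc (hinj x hxmem c hmemc h)
        simp [hxc, h2]
    have hcong_tw : (cs.map pvDigit).takeWhile (fun x => x == pvDigit c)
        = (cs.takeWhile (fun x => x == c)).map pvDigit := by
      rw [List.takeWhile_map, takeWhile_congr' _ _ cs hcong]
    have hcong_dw : (cs.map pvDigit).dropWhile (fun x => x == pvDigit c)
        = (cs.dropWhile (fun x => x == c)).map pvDigit := by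
      rw [List.dropWhile_map, dropWhile_congr' _ _ cs hcong]
    rw [hcong_tw, hcong_dw]
    have hlt : (cs.dropWhile (fun x => x == c)).length < k := by
      have h1 := List.length_dropWhile_le (fun x => x == c) cs
      have h2 : (c :: cs).length = k := hk
      simp at h2
      omega
    have hsub : ∀ a ∈ cs.dropWhile (fun x => x == c), ∀ b ∈ cs.dropWhile (fun x => x == c),
        pvDigit a = pvDigit b → a = b := by
      intro a ha b hb
      have hsl := List.dropWhile_sublist (l := cs) (p := fun x => x == c)
      exact hinj a (List.mem_cons_of_mem c (hsl.mem ha)) b (List.mem_cons_of_mem c (hsl.mem hb))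
    rw [ih _ hlt _ rfl hsub]
    simp

lemma char_eq_of_toNat_eq (c c' : Char) (h : c.toNat = c'.toNat) : c = c' := by
  apply Char.ext
  unfold Char.toNat at h
  exact UInt32.toNat_inj.1 h

lemma digit_enum (c : Char) (h : c.isDigit = true) :
    c = '0' ∨ c = '1' ∨ c = '2' ∨ c = '3' ∨ c = '4' ∨ c = '5' ∨ c = '6' ∨ c = '7' ∨ c = '8' ∨ c = '9' := by
  simp only [Char.isDigit, Bool.and_eq_true, decide_eq_true_eq] at h
  obtain ⟨h1, h2⟩ := h
  have h1' : 48 ≤ c.toNat := UInt32.le_iff_toNat_le.mp h1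
  have h2' : c.toNat ≤ 57 := UInt32.le_iff_toNat_le.mp h2
  have hc : c.toNat = 48 ∨ c.toNat = 49 ∨ c.toNat = 50 ∨ c.toNat = 51 ∨ c.toNat = 52 ∨ c.toNat = 53
      ∨ c.toNat = 54 ∨ c.toNat = 55 ∨ c.toNat = 56 ∨ c.toNat = 57 := by omega
  rcases hc with h | h | h | h | h | h | h | h | h | h
  · exact Or.inl (char_eq_of_toNat_eq _ _ (by rw [h]; rfl))
  · exact Or.inr (Or.inl (char_eq_of_toNat_eq _ _ (by rw [h]; rfl)))
  · exact Or.inr (Or.inr (Or.inl (char_eq_of_toNat_eq _ _ (by rw [h]; rfl))))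
  · exact Or.inr (Or.inr (Or.inr (Or.inl (char_eq_of_toNat_eq _ _ (by rw [h]; rfl)))))
  · exact Or.inr (Or.inr (Or.inr (Or.inr (Or.inl (char_eq_of_toNat_eq _ _ (by rw [h]; rfl))))))
  · exact Or.inr (Or.inr (Or.inr (Or.inr (Or.inr (Or.inl (char_eq_of_toNat_eq _ _ (by rw [h]; rfl)))))))
  · exact Or.inr (Or.inr (Or.inr (Or.inr (Or.inr (Or.inr (Or.inl (char_eq_of_toNat_eq _ _ (by rw [h]; rfl))))))))
  · exact Or.inr (Or.inr (Or.inr (Or.inr (Or.inr (Or.inr (Or.inr (Or.inl (char_eq_of_toNat_eq _ _ (by rw [h]; rfl)))))))))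
  · exact Or.inr (Or.inr (Or.inr (Or.inr (Or.inr (Or.inr (Or.inr (Or.inr (Or.inl (char_eq_of_toNat_eq _ _ (by rw [h]; rfl))))))))))
  · exact Or.inr (Or.inr (Or.inr (Or.inr (Or.inr (Or.inr (Or.inr (Or.inr (Or.inr (char_eq_of_toNat_eq _ _ (by rw [h]; rfl))))))))))

lemma toDigitsCore_digits : ∀ (fuel n : Nat) (acc : List Char),
    (∀ c ∈ acc, c.isDigit = true) → ∀ c ∈ Nat.toDigitsCore 10 fuel n acc, c.isDigit = true := by
  intro fuel
  induction fuel with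
  | zero => intro n acc hacc; simpa [Nat.toDigitsCore] using hacc
  | succ f ih =>
    intro n acc hacc c hc
    have hd : (Nat.digitChar (n % 10)).isDigit = true := by
      have : n % 10 < 10 := Nat.mod_lt _ (by omega)
      interval_cases h : n % 10 <;> decide
    rw [Nat.toDigitsCore] at hc
    by_cases hz : n / 10 = 0
    · simp only [hz, if_true] at hc
      rcases List.mem_cons.1 hc with rfl | hmem
      · exact hd
      · exact hacc _ hmem
    · simp only [hz, if_false] at hc
      refine ih _ _ ?_ c hc
      intro x hx
      rcases List.mem_cons.1 hx with rfl | hmem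
      · exact hd
      · exact hacc _ hmem

lemma toChars_digits (m : Int) (hm : 0 ≤ m) : ∀ c ∈ PySem.Int.toChars m, c.isDigit = true := by
  unfold PySem.Int.toChars
  rw [if_neg (by omega)]
  exact toDigitsCore_digits _ _ [] (by simp)

lemma pvDigit_inj_on_digits {s : List Char} (hdig : ∀ c ∈ s, c.isDigit = true) :
    ∀ a ∈ s, ∀ b ∈ s, pvDigit a = pvDigit b → a = b := by
  intro a ha b hb h
  rcases digit_enum a (hdig a ha) with rfl|rfl|rfl|rfl|rfl|rfl|rfl|rfl|rfl|rfl <;>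
    rcases digit_enum b (hdig b hb) with rfl|rfl|rfl|rfl|rfl|rfl|rfl|rfl|rfl|rfl <;>
      first | rfl | (exfalso; revert h; decide)

-- str(d) for a single digit int d coming from a digit char: toChars (pvDigit c) = [c]
lemma toChars_pvDigit (c : Char) (h : c.isDigit = true) : PySem.Int.toChars (pvDigit c) = [c] := by
  rcases digit_enum c h with rfl|rfl|rfl|rfl|rfl|rfl|rfl|rfl|rfl|rfl <;> decide

lemma toDigitsCore_ne_nil : ∀ (fuel n : Nat) (acc : List Char),
    fuel ≠ 0 ∨ acc ≠ [] → Nat.toDigitsCore 10 fuel n acc ≠ [] := by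
  intro fuel
  induction fuel with
  | zero =>
    intro n acc h
    rcases h with h | h
    · exact absurd rfl h
    · simpa [Nat.toDigitsCore]
  | succ f ih =>
    intro n acc _
    rw [Nat.toDigitsCore]
    by_cases hz : n / 10 = 0
    · simp [hz]
    · simp only [hz, if_false]
      exact ih _ _ (Or.inr (by simp))

lemma toChars_ne_nil (m : Int) (hm : 0 ≤ m) : PySem.Int.toChars m ≠ [] := by
  unfold PySem.Int.toChars
  rw [if_neg (by omega)]
  exact toDigitsCore_ne_nil _ _ [] (Or.inl (by omega))

-- join with an empty separator is flatten
lemma join_nil_flatten : ∀ (xss : List (List Char)), PySem.Chars.join [] xss = xss.flatten := by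
  intro xss
  induction xss with
  | nil => simp [PySem.Chars.join_nil]
  | cons a t ih =>
    rcases t with _ | ⟨b, t'⟩
    · simp [PySem.Chars.join_singleton]
    · rw [PySem.Chars.join_cons_cons, ih]
      simp

-- hTriple commutes with mapping a function over the segment
lemma hTriple_map (f : Char → Int) (g : List Char) : hTriple (g.map f) = (hTripleC g).map f := by
  simp only [hTriple, hTripleC, List.length_map]
  split_ifs <;> simp

-- B's zip-of-shifted-copies pass equals the prev-carrying recursion pcE
lemma zip_expand : ∀ (s : List Char) (prev : Option Char),
    ((prev :: s.map some).zip (s.zip ((s.drop 1).map some ++ [none]))).map (fun pcn =>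
        if pcn.1 ≠ some pcn.2.1 ∧ pcn.2.2 ≠ some pcn.2.1
        then [pcn.2.1, pcn.2.1, pcn.2.1] else [pcn.2.1])
      = pcE prev s := by
  intro s
  induction s with
  | nil => intro prev; simp [pcE]
  | cons c cs ih =>
    intro prev
    rcases cs with _ | ⟨d, cs'⟩
    · simp [pcE]
    · rw [show ((c :: d :: cs').drop 1) = d :: cs' from rfl]
      simp only [List.map_cons, List.cons_append, List.zip_cons_cons, List.map_cons]
      rw [show pcE prev (c :: d :: cs')
            = (if prev ≠ some c ∧ (d :: cs').head? ≠ some c then [c, c, c] else [c])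
              :: pcE (some c) (d :: cs') from rfl]
      congr 1
      exact ih (some c)

-- a run's interior characters each contribute a single copy under pcE
lemma pcE_inner (c : Char) : ∀ (t rest : List Char), (∀ x ∈ t, x = c) →
    (rest = [] ∨ ∃ d r', rest = d :: r' ∧ d ≠ c) →
    (pcE (some c) (t ++ rest)).flatten = t ++ (pcE (some c) rest).flatten := by
  intro t
  induction t with
  | nil => intro rest _ _; simp
  | cons x t' ih =>
    intro rest hall hshape
    have hx : x = c := hall x (by simp)
    subst hx
    have hhead : ((t' ++ rest).head? = some x) ∨ (¬ (some x : Option Char) ≠ some x) := by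
      right; simp
    rw [List.cons_append,
      show pcE (some x) (x :: (t' ++ rest))
        = (if (some x : Option Char) ≠ some x ∧ (t' ++ rest).head? ≠ some x then [x, x, x] else [x])
          :: pcE (some x) (t' ++ rest) from rfl]
    rw [if_neg (by simp)]
    rw [List.flatten_cons, ih rest (fun y hy => hall y (by simp [hy])) hshape]
    simp

-- pcE equals the tripled-runs flattening
lemma pcE_runs : ∀ (s : List Char) (prev : Option Char),
    (∀ c, s.head? = some c → prev ≠ some c) →
    (pcE prev s).flatten = (pyRuns s).flatMap hTripleC := by
  intro s
  induction hk : s.length using Nat.strong_induction_on generalizing s with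
  | _ k ih =>
  intro prev hprev
  rcases s with _ | ⟨c, cs⟩
  · simp [pcE, pyRuns]
  · obtain ⟨t, rest, rfl, hall, hshape⟩ :
        ∃ t rest, cs = t ++ rest ∧ (∀ x ∈ t, x = c) ∧
          (rest = [] ∨ ∃ d r', rest = d :: r' ∧ d ≠ c) := by
      refine ⟨cs.takeWhile (fun x => x == c), cs.dropWhile (fun x => x == c),
        List.takeWhile_append_dropWhile.symm, ?_, ?_⟩
      · intro x hx; simpa using List.mem_takeWhile_imp hx
      · rcases hr : cs.dropWhile (fun x => x == c) with _ | ⟨d, r'⟩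
        · exact Or.inl rfl
        · right
          refine ⟨d, r', rfl, ?_⟩
          have := dropWhile_head_false (fun x => x == c) cs hr
          simpa using this
    obtain ⟨htw, hdw⟩ := run_split hall hshape
    rw [pyRuns_cons, htw, hdw, List.flatMap_cons]
    have hpc : prev ≠ some c := hprev c rfl
    rw [show pcE prev (c :: (t ++ rest))
        = (if prev ≠ some c ∧ (t ++ rest).head? ≠ some c then [c, c, c] else [c])
          :: pcE (some c) (t ++ rest) from rfl]
    rw [List.flatten_cons, pcE_inner c t rest hall hshape]
    have hrest_flat : (pcE (some c) rest).flatten = (pyRuns rest).flatMap hTripleC := by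
      have hlt : rest.length < k := by
        have : (c :: (t ++ rest)).length = k := hk
        simp at this
        omega
      refine ih rest.length hlt rest rfl (some c) ?_
      intro d hd
      rcases hshape with rfl | ⟨d', r', rfl, hd'⟩
      · simp at hd
      · simp only [List.head?_cons, Option.some.injEq] at hd
        subst hd
        simpa [eq_comm] using hd'
    rw [hrest_flat]
    rcases t with _ | ⟨x, t'⟩
    · have hhead : (([] ++ rest : List Char)).head? ≠ some c := by
        rcases hshape with rfl | ⟨d, r', rfl, hd⟩
        · simp
        · simpa using hd
      rw [if_pos ⟨hpc, hhead⟩]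
      simp [hTripleC]
    · have hx : x = c := hall x (by simp)
      subst hx
      rw [if_neg (by simp)]
      simp [hTripleC]

-- ===== VERDICT (by name: the statement is the Claim_ definition above) =====
theorem numbers_need_friends_too_spec : Claim_equal_numbers_need_friends_too := by
  intro m _ hpre
  unfold Spec_numbers_need_friends_too
  have hdig : ∀ c ∈ PySem.Int.toChars m, c.isDigit = true := toChars_digits m hpre
  have hne : PySem.Int.toChars m ≠ [] := toChars_ne_nil m hpre
  simp only [numbers_need_friends_too, numbers_need_friends_too_alt]
  set s : List Char := PySem.Int.toChars m with hs
  set n : List Int := s.map (fun i => pvDigit i) with hn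
  obtain ⟨k, hk⟩ : ∃ k, n.length = k + 1 := by
    rcases hcs : s with _ | ⟨a, t⟩
    · exact absurd hcs hne
    · exact ⟨t.length, by rw [hn, hcs]; simp⟩
  have hindex : (PySem.List.pyRange 0 ((n.length : Int) - 1) 1).foldl
      (fun acc i => if PySem.List.pyGetD n i 0 ≠ PySem.List.pyGetD n (i + 1) 0 then acc ++ [i] else acc) []
      = (cutsRec n).map (fun (i : Nat) => (i : Int)) := by
    rw [PySem.List.foldl_append_ite_eq_filter]
    have h1 : ((n.length : Int) - 1) = ((k : Nat) : Int) := by rw [hk]; push_cast; ring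
    rw [h1, PySem.List.pyRange_zero_natCast, List.filter_map]
    have h2 : ((fun i => decide (PySem.List.pyGetD n i 0 ≠ PySem.List.pyGetD n (i + 1) 0)) ∘ (fun (j : Nat) => (j : Int)))
        = fun (i : Nat) => decide (n.getD i 0 ≠ n.getD (i + 1) 0) := by
      funext i
      simp only [Function.comp]
      rw [PySem.List.pyGetD_natCast]
      have h3 : ((i : Int) + 1) = ((i + 1 : Nat) : Int) := by push_cast; ring
      rw [h3, PySem.List.pyGetD_natCast]
    rw [h2, List.nil_append, filter_cuts k n hk]
  rw [hindex]
  have hshift : ((cutsRec n).map (fun (i : Nat) => (i : Int))).map (fun x => x + 1)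
      = ((cutsRec n).map (· + 1)).map (fun (i : Nat) => (i : Int)) := by
    rw [List.map_map, List.map_map]
    congr 1
  rw [hshift]
  have h0 : ([(0 : Int)] ++ ((cutsRec n).map (· + 1)).map (fun (i : Nat) => (i : Int)))
      = (((0 : Nat) : Int) :: ((cutsRec n).map (· + 1)).map (fun (i : Nat) => (i : Int))) := by
    simp
  rw [h0, fold_pairs n ((cutsRec n).map (· + 1)) 0, main_chop n, List.nil_append]
  -- A's digit-int list is the mapped tripled-run character list
  have hinj := pvDigit_inj_on_digits hdig
  have hflat : (runsI n).flatMap hTriple = ((pyRuns s).flatMap hTripleC).map pvDigit := by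
    rw [hn, runs_map s.length s rfl hinj, List.flatMap_map, List.map_flatMap]
    congr 1
    funext g
    exact hTriple_map pvDigit g
  rw [hflat]
  -- turn str(d)-join back into the character list itself
  have hmem_runs : ∀ c ∈ (pyRuns s).flatMap hTripleC, c ∈ s := by
    have hruns : ∀ (l : List Char) (g : List Char), g ∈ pyRuns l → ∀ c ∈ g, c ∈ l := by
      intro l
      induction hl : l.length using Nat.strong_induction_on generalizing l with
      | _ k ih =>
      rcases l with _ | ⟨a, t⟩
      · intro g hg; simp [pyRuns] at hg
      · intro g hg c hc
        rw [pyRuns_cons] at hg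
        rcases List.mem_cons.1 hg with rfl | hg'
        · rcases List.mem_cons.1 hc with rfl | hc'
          · simp
          · exact List.mem_cons_of_mem _ ((List.takeWhile_sublist _).mem hc')
        · have hlt : (t.dropWhile (fun x => x == a)).length < k := by
            have h1 := List.length_dropWhile_le (fun x => x == a) t
            have h2 : (a :: t).length = k := hl
            simp at h2
            omega
          have := ih _ hlt _ rfl g hg' c hc
          exact List.mem_cons_of_mem _ ((List.dropWhile_sublist _).mem this)
    intro c hc
    rw [List.mem_flatMap] at hc
    obtain ⟨g, hg, hcg⟩ := hc
    have hsub : ∀ x ∈ hTripleC g, x ∈ g := by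
      intro x hx
      simp only [hTripleC] at hx
      split_ifs at hx <;> simp_all
    exact hruns s g hg c (hsub c hcg)
  have hjoinA : PySem.Chars.join [] ((((pyRuns s).flatMap hTripleC).map pvDigit).map (fun i => PySem.Int.toChars i))
      = (pyRuns s).flatMap hTripleC := by
    rw [List.map_map]
    have hone : (((pyRuns s).flatMap hTripleC).map ((fun i => PySem.Int.toChars i) ∘ pvDigit))
        = ((pyRuns s).flatMap hTripleC).map (fun c => [c]) := by
      apply List.map_congr_left
      intro c hc
      exact toChars_pvDigit c (hdig c (hmem_runs c hc))
    rw [hone]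
    exact PySem.Chars.join_nil_singletons _
  rw [hjoinA]
  -- B's side: the zipped local rule is the same character list
  have hB : PySem.Chars.join []
      (((([none] ++ s.map some : List (Option Char))).zip
          (s.zip ((s.drop 1).map some ++ [none] : List (Option Char)))).map
        (fun (pcn : Option Char × Char × Option Char) =>
          if pcn.1 ≠ some pcn.2.1 ∧ pcn.2.2 ≠ some pcn.2.1
          then [pcn.2.1, pcn.2.1, pcn.2.1] else [pcn.2.1]))
      = (pyRuns s).flatMap hTripleC := by
    rw [join_nil_flatten, show ([none] ++ s.map some : List (Option Char)) = none :: s.map some from rfl,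
      zip_expand s none]
    exact pcE_runs s none (fun c _ => by simp)
  rw [hB]
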